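-- pv_equiv track=rewrite | github.com/Fare-spec/scrabble | scrabble/main.py | _extend_word
-- ===== SOURCE A (Python) =====
-- def _cell_has_letter(cell: str) -> bool:
--     """Vrai si la case contient au moins une lettre."""
--     return any(c.isalpha() for c in cell)
--
-- def _cell_letter(cell: str) -> str:
--     """Renvoie la lettre présente dans la case (en majuscule), ou '' s'il n'y en a pas."""
--     for c in cell:
--         if c.isalpha():
--             return c.upper()
--     return ""
--
-- def _extend_word(plateau, i: int, j: int, direction: str):
--     """À partir de la case (i,j) contenant une lettre, étend dans les deux
--     sens pour récupérer le mot complet dans `direction`.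
--     Renvoie (mot, start_i, start_j).
--     """
--     taille = len(plateau)
--     direction = direction.upper()
--     if direction == "H":
--         dl, dc = 0, 1
--     else:
--         dl, dc = 1, 0
--
--     l, c = i, j
--     while True:
--         nl, nc = l - dl, c - dc
--         if 0 <= nl < taille and 0 <= nc < taille and _cell_has_letter(plateau[nl][nc]):
--             l, c = nl, nc
--         else:
--             break
--
--     start_i, start_j = l, c
--     lettres = []
--     while 0 <= l < taille and 0 <= c < taille and _cell_has_letter(plateau[l][c]):
--         lettres.append(_cell_letter(plateau[l][c]))
--         l += dl
--         c += dc
--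
--     return "".join(lettres), start_i, start_j
-- ===== SOURCE B (Python) =====
-- def _extend_word(plateau, i, j, direction):
--     n = len(plateau)
--     horiz = direction.upper() == "H"
--     p0 = j if horiz else i
--
--     def letter(p):
--         """Uppercased letter of the cell at 1-D position p on the line through (i,j), '' if none."""
--         l, c = (i, p) if horiz else (p, j)
--         if 0 <= l < n and 0 <= c < n:
--             row = plateau[l]
--             if c < len(row):
--                 return next((ch.upper() for ch in row[c] if ch.isalpha()), '')
--         return ''
--
--     if not (0 <= p0 <= n):
--         return '', i, j
--     # one picture of the whole line: its letter per cell, '.' for a gap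
--     line = ''.join(letter(p) or '.' for p in range(n))
--     # start of the run touching p0: one forward scan remembering the last gap before p0
--     start = 0
--     for p in range(p0):
--         if line[p] == '.':
--             start = p + 1
--     stop = start
--     while stop < n and line[stop] != '.':
--         stop += 1
--     word = line[start:stop]
--     return (word, i, start) if horiz else (word, start, j)
-- ===== Notes on version B (the rewrite author's own statement) =====
-- stated objective: alternative
-- what changed: A walks backward cell by cell from (i,j) to find the start of the word and then re-scans forward collecting letters; B first renders the whole board line through (i,j) as one gap-marked string (its letter per cell, '.' for a letterless cell) and then locates the word purely by index arithmetic on that string: a forward scan from 0 remembering the last gap before p0 gives the start, a scan to the next gap gives the stop, and the word is just the slice line[start:stop].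
import Mathlib
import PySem

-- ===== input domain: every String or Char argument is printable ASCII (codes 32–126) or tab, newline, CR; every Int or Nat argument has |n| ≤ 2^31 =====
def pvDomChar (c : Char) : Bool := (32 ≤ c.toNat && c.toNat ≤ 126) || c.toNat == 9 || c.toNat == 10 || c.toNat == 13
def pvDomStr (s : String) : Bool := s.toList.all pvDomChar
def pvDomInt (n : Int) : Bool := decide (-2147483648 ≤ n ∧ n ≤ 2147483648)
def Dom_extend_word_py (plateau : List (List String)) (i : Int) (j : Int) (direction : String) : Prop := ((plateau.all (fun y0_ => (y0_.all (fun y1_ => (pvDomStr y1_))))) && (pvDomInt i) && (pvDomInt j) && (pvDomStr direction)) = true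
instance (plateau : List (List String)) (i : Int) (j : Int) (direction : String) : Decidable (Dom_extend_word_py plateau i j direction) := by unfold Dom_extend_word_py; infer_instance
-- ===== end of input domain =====

-- B renders the whole board line through (i,j) as one gap-marked string once and then finds the
-- word by pure index arithmetic on it, instead of A's backward walk plus forward re-scan: alternative decomposition.

-- ===== PORT A =====
-- any(c.isalpha() for c in cell)
def pvHasLetterA (cell : String) : Bool := cell.toList.any (fun ch => PySem.Chars.isalpha ch)

-- first alpha char of the cell, uppercased ('' if none)
def pvFirstAlphaA : List Char → String
  | [] => ""
  | ch :: rest => if PySem.Chars.isalpha ch then String.ofList [PySem.Chars.upperChar ch] else pvFirstAlphaA rest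

def pvCellLetterA (cell : String) : String := pvFirstAlphaA cell.toList

-- plateau[l][c]; A only evaluates it under 0 ≤ l < taille ∧ 0 ≤ c < taille, and Pre_ makes every
-- cell the walk touches exist, so getD with defaults is exact there (outside, Python raises IndexError).
def pvCellAt (plateau : List (List String)) (l c : Int) : String :=
  (plateau.getD l.toNat []).getD c.toNat ""

-- the combined guard 0 <= l < taille and 0 <= c < taille and _cell_has_letter(plateau[l][c])
def pvCondA (plateau : List (List String)) (taille l c : Int) : Bool :=
  decide (0 ≤ l) && decide (l < taille) && decide (0 ≤ c) && decide (c < taille)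
    && pvHasLetterA (pvCellAt plateau l c)

-- first while loop; fuel (i+j).toNat+1 suffices: each step needs the new cell coords ≥ 0 and lowers l+c by 1
def pvBackA (plateau : List (List String)) (taille dl dc : Int) : Nat → Int → Int → Int × Int
  | 0, l, c => (l, c)
  | f + 1, l, c =>
    if pvCondA plateau taille (l - dl) (c - dc) then pvBackA plateau taille dl dc f (l - dl) (c - dc)
    else (l, c)

-- second while loop (lettres.append); fuel (2*taille-l-c).toNat+1 suffices: the guard bounds l+c by 2*taille-2
def pvFwdA (plateau : List (List String)) (taille dl dc : Int) : Nat → Int → Int → List String → List String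
  | 0, _, _, acc => acc
  | f + 1, l, c, acc =>
    if pvCondA plateau taille l c then
      pvFwdA plateau taille dl dc f (l + dl) (c + dc) (acc ++ [pvCellLetterA (pvCellAt plateau l c)])
    else acc

def extend_word_py (plateau : List (List String)) (i : Int) (j : Int) (direction : String) : String × Int × Int :=
  let taille : Int := plateau.length
  let dir := PySem.Str.upper direction
  let dl : Int := if dir = "H" then 0 else 1
  let dc : Int := if dir = "H" then 1 else 0
  let st := pvBackA plateau taille dl dc ((i + j).toNat + 1) i j
  let lettres := pvFwdA plateau taille dl dc ((2 * taille - st.1 - st.2).toNat + 1) st.1 st.2 []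
  (PySem.Str.join "" lettres, st.1, st.2)

-- ===== PORT B =====
-- letter(p): uppercased letter of the cell at 1-D position p on the line through (i,j), '' if none
-- (next((ch.upper() for ch in cell if ch.isalpha()), '') is pvLetScanB; row indexing is exact under the two explicit bounds checks)
def pvLetScanB (cs : List Char) : String :=
  match cs.find? (fun ch => PySem.Chars.isalpha ch) with
  | some ch => String.ofList [PySem.Chars.upperChar ch]
  | none => ""

def pvLetterB (plateau : List (List String)) (n i j : Int) (horiz : Bool) (p : Int) : String :=
  let l := if horiz then i else p
  let c := if horiz then p else j
  if 0 ≤ l ∧ l < n ∧ 0 ≤ c ∧ c < n then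
    let row := plateau.getD l.toNat []
    if c < (row.length : Int) then pvLetScanB (row.getD c.toNat "").toList else ""
  else ""

-- line = ''.join(letter(p) or '.' for p in range(n)), kept as its list of characters
def pvLineB (plateau : List (List String)) (n i j : Int) (horiz : Bool) : List Char :=
  (List.range plateau.length).map (fun (p : Nat) =>
    match (pvLetterB plateau n i j horiz (p : Int)).toList with
    | [] => '.'
    | ch :: _ => ch)

-- for p in range(p0): if line[p] == '.': start = p + 1
def pvStartB (line : List Char) (p0 : Int) : Int :=
  (List.range p0.toNat).foldl (fun st p => if line.getD p '.' = '.' then (p : Int) + 1 else st) 0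

-- while stop < n and line[stop] != '.': stop += 1   (fuel line.length + 1 suffices: start ≥ 0 and stop < n each step)
def pvStopB (line : List Char) (n : Int) : Nat → Int → Int
  | 0, st => st
  | f + 1, st => if st < n ∧ line.getD st.toNat '.' ≠ '.' then pvStopB line n f (st + 1) else st

def extend_word_py_alt (plateau : List (List String)) (i : Int) (j : Int) (direction : String) : String × Int × Int :=
  let n : Int := plateau.length
  let horiz := PySem.Str.upper direction = "H"
  let p0 : Int := if horiz then j else i
  if 0 ≤ p0 ∧ p0 ≤ n then
    let line := pvLineB plateau n i j horiz
    let start := pvStartB line p0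
    let stop := pvStopB line n (line.length + 1) start
    let word := String.ofList (PySem.List.slice line (some start) (some stop))
    if horiz then (word, i, start) else (word, start, j)
  else ("", i, j)

-- ===== PRECONDITION & SPEC =====
-- some position x on the travelled line whose cell is missing (row too short) is reachable from
-- position p0 through a contiguous block of in-range letter cells, on the backward or forward side
def pvChainCrash (T p0 : Int) (ok letter : Int → Bool) : Prop :=
  ∃ x ∈ List.range T.toNat, ok (x : Int) = false ∧
    (((x : Int) < p0 ∧ p0 ≤ T ∧
        ∀ m ∈ List.range T.toNat, (x : Int) < (m : Int) ∧ (m : Int) < p0 → ok (m : Int) = true ∧ letter (m : Int) = true)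
     ∨ (p0 ≤ (x : Int) ∧ 0 ≤ p0 ∧
        ∀ m ∈ List.range T.toNat, p0 ≤ (m : Int) ∧ (m : Int) < (x : Int) → ok (m : Int) = true ∧ letter (m : Int) = true))
-- Pre_ excludes EXACTLY the inputs on which Python A raises IndexError (ragged boards where the
-- walk from (i,j) reaches a cell of a row too short for the crossing index).
def Pre_extend_word_py (plateau : List (List String)) (i : Int) (j : Int) (direction : String) : Prop :=
  ¬ (if PySem.Str.upper direction = "H" then
        0 ≤ i ∧ i < (plateau.length : Int) ∧ pvChainCrash (plateau.length : Int) j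
          (fun x => decide (x < ((plateau.getD i.toNat []).length : Int)))
          (fun x => pvHasLetterA (pvCellAt plateau i x))
      else
        0 ≤ j ∧ j < (plateau.length : Int) ∧ pvChainCrash (plateau.length : Int) i
          (fun x => decide (j < ((plateau.getD x.toNat []).length : Int)))
          (fun x => pvHasLetterA (pvCellAt plateau x j)))
instance (plateau : List (List String)) (i : Int) (j : Int) (direction : String) : Decidable (Pre_extend_word_py plateau i j direction) := by unfold Pre_extend_word_py pvChainCrash; infer_instance

def pvWitness_extend_word_py : List (List String) × Int × Int × String := ([["A", "B"], ["", "c"]], 0, 1, "h")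

def Spec_extend_word_py (plateau : List (List String)) (i : Int) (j : Int) (direction : String) (out : String × Int × Int) : Prop := out = extend_word_py_alt plateau i j direction
instance (plateau : List (List String)) (i : Int) (j : Int) (direction : String) (out : String × Int × Int) : Decidable (Spec_extend_word_py plateau i j direction out) := by unfold Spec_extend_word_py; infer_instance

-- ===== CLAIM (what is proved, stated in full; the proofs are below) =====
def Claim_equal_extend_word_py : Prop := ∀ (plateau : List (List String)) (i : Int) (j : Int) (direction : String), Dom_extend_word_py plateau i j direction → Pre_extend_word_py plateau i j direction → Spec_extend_word_py plateau i j direction (extend_word_py plateau i j direction)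

-- ===== LEMMAS AND PROOFS =====

theorem pvWitness_ok :
    Dom_extend_word_py pvWitness_extend_word_py.1 pvWitness_extend_word_py.2.1 pvWitness_extend_word_py.2.2.1 pvWitness_extend_word_py.2.2.2 ∧
    Pre_extend_word_py pvWitness_extend_word_py.1 pvWitness_extend_word_py.2.1 pvWitness_extend_word_py.2.2.1 pvWitness_extend_word_py.2.2.2 := by
  constructor <;> decide


-- ---------- generic Char / String facts ----------

theorem pvCharToNatOfNat (n : Nat) (h : n < 55296) : (Char.ofNat n).toNat = n := by
  unfold Char.ofNat
  split
  · rfl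
  · rename_i hv; exact absurd (Or.inl h) hv

-- an uppercased alphabetic character is never the gap marker '.'
theorem pvUpperNeDot (c : Char) (h : PySem.Chars.isalpha c = true) : PySem.Chars.upperChar c ≠ '.' := by
  simp only [PySem.Chars.isalpha, PySem.Chars.isupper, PySem.Chars.islower, PySem.Chars.upperChar,
    Bool.or_eq_true, Bool.and_eq_true, decide_eq_true_eq, Char.le_def] at *
  have eA : ('A' : Char).val.toNat = 65 := rfl
  have eZ : ('Z' : Char).val.toNat = 90 := rfl
  have ea : ('a' : Char).val.toNat = 97 := rfl
  have ez : ('z' : Char).val.toNat = 122 := rfl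
  have ed : ('.' : Char).val.toNat = 46 := rfl
  intro he
  rcases h with ⟨h1, h2⟩ | ⟨h1, h2⟩
  · have hl := UInt32.le_iff_toNat_le.mp h1
    have hu := UInt32.le_iff_toNat_le.mp h2
    rw [if_neg (by
      rintro ⟨ha, -⟩
      have hx := UInt32.le_iff_toNat_le.mp ha
      omega)] at he
    have : c.val.toNat = ('.' : Char).val.toNat := by rw [he]
    omega
  · have hl := UInt32.le_iff_toNat_le.mp h1
    have hu := UInt32.le_iff_toNat_le.mp h2
    rw [if_pos ⟨h1, h2⟩] at he
    have hc : (Char.ofNat (c.toNat - 32)).toNat = c.toNat - 32 := pvCharToNatOfNat _ (by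
      have hcv : c.toNat = c.val.toNat := (Char.toNat_val c).symm; omega)
    rw [he] at hc
    have h46 : ('.' : Char).toNat = 46 := rfl
    have hcv : c.toNat = c.val.toNat := (Char.toNat_val c).symm
    rw [h46] at hc
    omega

theorem pvJoinEmptyCons (p : List Char) (rest : List (List Char)) :
    PySem.Chars.join [] (p :: rest) = p ++ PySem.Chars.join [] rest := by
  cases rest with
  | nil => simp [PySem.Chars.join_singleton, PySem.Chars.join_nil]
  | cons q u => rw [PySem.Chars.join_cons_cons]; simp

theorem pvStrEmptyToList : ("" : String).toList = [] := rfl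

-- ---------- the two single-cell scanners agree ----------

theorem pvScanEq : ∀ cs, pvLetScanB cs = pvFirstAlphaA cs := by
  intro cs
  induction cs with
  | nil => rfl
  | cons ch rest ih =>
    by_cases h : PySem.Chars.isalpha ch = true
    · simp [pvLetScanB, pvFirstAlphaA, List.find?_cons_of_pos, h]
    · have h1 : pvLetScanB (ch :: rest) = pvLetScanB rest := by
        unfold pvLetScanB
        rw [List.find?_cons_of_neg (by simp [h])]
      have h2 : pvFirstAlphaA (ch :: rest) = pvFirstAlphaA rest := by
        unfold pvFirstAlphaA
        rw [if_neg h]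
        cases rest <;> rfl
      rw [h1, h2, ih]

-- pvFirstAlphaA is "" exactly when the cell has no letter, else one uppercased alpha char
theorem pvFirstAlphaCases : ∀ cs : List Char,
    ((pvFirstAlphaA cs).toList = [] ∧ cs.any (fun c => PySem.Chars.isalpha c) = false) ∨
    (∃ ch, PySem.Chars.isalpha ch = true ∧ (pvFirstAlphaA cs).toList = [PySem.Chars.upperChar ch] ∧
      cs.any (fun c => PySem.Chars.isalpha c) = true) := by
  intro cs
  induction cs with
  | nil => left; exact ⟨rfl, rfl⟩
  | cons ch rest ih =>
    by_cases h : PySem.Chars.isalpha ch = true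
    · right; exact ⟨ch, h, by simp [pvFirstAlphaA, h], by simp [h]⟩
    · rcases ih with ⟨h1, h2⟩ | ⟨c0, hc0, h1, h2⟩
      · left; constructor
        · simpa [pvFirstAlphaA, h] using h1
        · simp [h, h2]
      · right; exact ⟨c0, hc0, by simpa [pvFirstAlphaA, h] using h1, by simp [h, h2]⟩

-- a nonempty pvLetScanB result is a single uppercased alpha char
theorem pvScanShape (cs : List Char) (ch : Char) (t : List Char)
    (h : (pvLetScanB cs).toList = ch :: t) :
    (∃ c0, PySem.Chars.isalpha c0 = true ∧ ch = PySem.Chars.upperChar c0) ∧ t = [] := by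
  rw [pvScanEq] at h
  rcases pvFirstAlphaCases cs with ⟨h1, _⟩ | ⟨c0, hc0, h1, _⟩
  · rw [h1] at h; cases h
  · rw [h1] at h
    injection h with h2 h3
    exact ⟨⟨c0, hc0, h2.symm⟩, h3.symm⟩

-- ---------- bridging A's cell tests to B's letter function ----------

-- the guard+letter of B at 1-D position p versus A's combined guard at the same 2-D cell
theorem pvBridgeCond (plateau : List (List String)) (i j : Int) (horiz : Bool) (p : Int) :
    (pvCondA plateau (plateau.length : Int) (if horiz then i else p) (if horiz then p else j) = true
      ↔ (pvLetterB plateau (plateau.length : Int) i j horiz p).toList ≠ []) ∧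
    (pvCondA plateau (plateau.length : Int) (if horiz then i else p) (if horiz then p else j) = true →
      (pvCellLetterA (pvCellAt plateau (if horiz then i else p) (if horiz then p else j))).toList
        = (pvLetterB plateau (plateau.length : Int) i j horiz p).toList) := by
  set l : Int := if horiz then i else p with hl
  set c : Int := if horiz then p else j with hc
  unfold pvCondA pvLetterB pvCellAt pvHasLetterA pvCellLetterA
  rw [← hl, ← hc]
  by_cases hb : 0 ≤ l ∧ l < (plateau.length : Int) ∧ 0 ≤ c ∧ c < (plateau.length : Int)
  · rw [if_pos hb]
    obtain ⟨hb1, hb2, hb3, hb4⟩ := hb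
    have hdec : (decide (0 ≤ l) && decide (l < ((plateau.length : Nat) : Int)) && decide (0 ≤ c)
        && decide (c < ((plateau.length : Nat) : Int))) = true := by
      simp [hb1, hb2, hb3, hb4]
    by_cases hrow : c < (((plateau.getD l.toNat []).length : Nat) : Int)
    · rw [if_pos hrow, pvScanEq]
      rcases pvFirstAlphaCases ((plateau.getD l.toNat []).getD c.toNat "").toList with ⟨h1, h2⟩ | ⟨c0, hc0, h1, h2⟩
      · rw [h2, Bool.and_false]
        constructor
        · constructor
          · intro hfalse; cases hfalse
          · intro hne; exact absurd h1 hne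
        · intro hcond; cases hcond
      · rw [h2, Bool.and_true]
        constructor
        · constructor
          · intro _; rw [h1]; simp
          · intro _; exact hdec
        · intro _; rfl
    · have hge : (plateau.getD l.toNat []).length ≤ c.toNat := by omega
      have hdef : (plateau.getD l.toNat []).getD c.toNat "" = "" := List.getD_eq_default _ _ hge
      rw [if_neg hrow, hdef]
      constructor
      · simp
      · intro hcond; exact absurd hcond (by simp)
  · rw [if_neg hb]
    have hfalse : ∀ hcond : (decide (0 ≤ l) && decide (l < ((plateau.length : Nat) : Int)) && decide (0 ≤ c)
        && decide (c < ((plateau.length : Nat) : Int))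
        && ((plateau.getD l.toNat []).getD c.toNat "").toList.any fun ch => PySem.Chars.isalpha ch) = true, False := by
      intro hcond
      simp only [Bool.and_eq_true, decide_eq_true_eq] at hcond
      exact hb ⟨hcond.1.1.1.1, hcond.1.1.1.2, hcond.1.1.2, hcond.1.2⟩
    constructor
    · constructor
      · intro hcond; exact absurd hcond (fun h => hfalse h)
      · intro hne; exact absurd pvStrEmptyToList hne
    · intro hcond; exact absurd hcond (fun h => hfalse h)

-- ---------- the rendered line ----------

-- the Bool test "position p carries a letter", read off the rendered line alone
def pvCondL (L : List Char) (p : Int) : Bool :=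
  decide (0 ≤ p) && decide (p < (L.length : Int)) && (L.getD p.toNat '.' != '.')

theorem pvLineLen (plateau : List (List String)) (n i j : Int) (horiz : Bool) :
    (pvLineB plateau n i j horiz).length = plateau.length := by
  simp [pvLineB]

theorem pvLineChar (plateau : List (List String)) (n i j : Int) (horiz : Bool) (k : Nat)
    (hk : k < plateau.length) :
    (pvLineB plateau n i j horiz).getD k '.' =
      (match (pvLetterB plateau n i j horiz (k : Int)).toList with
       | [] => '.'
       | ch :: _ => ch) := by
  unfold pvLineB
  rw [List.getD_eq_getElem _ _ (by simpa using hk)]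
  rw [List.getElem_map, List.getElem_range]

-- A's guard at 1-D position p is exactly "the rendered line shows a letter at p"
theorem pvCondBridge (plateau : List (List String)) (i j : Int) (horiz : Bool) (p : Int) :
    pvCondA plateau (plateau.length : Int) (if horiz then i else p) (if horiz then p else j)
      = pvCondL (pvLineB plateau (plateau.length : Int) i j horiz) p := by
  set L := pvLineB plateau (plateau.length : Int) i j horiz with hL
  obtain ⟨hiff, _⟩ := pvBridgeCond plateau i j horiz p
  by_cases hp : 0 ≤ p ∧ p < (plateau.length : Int)
  · have hk : p.toNat < plateau.length := by omega
    have hchar := pvLineChar plateau (plateau.length : Int) i j horiz p.toNat hk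
    have hpcast : ((p.toNat : Int)) = p := by omega
    rw [hpcast] at hchar
    rcases hcs : (pvLetterB plateau (plateau.length : Int) i j horiz p).toList with _ | ⟨ch, t⟩
    · have : pvCondA plateau (plateau.length : Int) (if horiz then i else p) (if horiz then p else j) = false := by
        rcases h : pvCondA plateau (plateau.length : Int) (if horiz then i else p) (if horiz then p else j)
        · rfl
        · exact absurd hcs (hiff.mp h)
      rw [this]
      unfold pvCondL
      rw [← hL] at hchar
      have hdot : L.getD p.toNat '.' = '.' := by rw [hchar, hcs]
      rw [hdot]
      simp
    · have hcond : pvCondA plateau (plateau.length : Int) (if horiz then i else p) (if horiz then p else j) = true := by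
        apply hiff.mpr; simp [hcs]
      rw [hcond]
      -- the letter really is a letter: it comes from pvLetScanB, so it is an uppercased alpha char
      have hsrc : ∃ c0, PySem.Chars.isalpha c0 = true ∧ ch = PySem.Chars.upperChar c0 := by
        simp only [pvLetterB] at hcs
        rw [pvScanEq] at hcs
        repeat' split at hcs
        all_goals first
          | (rw [pvStrEmptyToList] at hcs; cases hcs)
          | (rw [← pvScanEq] at hcs; exact (pvScanShape _ _ _ hcs).1)
      obtain ⟨c0, hc0, hch⟩ := hsrc
      have hne : ch ≠ '.' := hch ▸ pvUpperNeDot c0 hc0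
      unfold pvCondL
      rw [← hL] at hchar
      rw [pvLineLen]
      have hdot : L.getD p.toNat '.' = ch := by rw [hchar, hcs]
      rw [hdot]
      simp [hp.1, hp.2, hne]
  · -- p itself out of [0, n): both sides false
    have h1 : pvCondA plateau (plateau.length : Int) (if horiz then i else p) (if horiz then p else j) = false := by
      rcases h : pvCondA plateau (plateau.length : Int) (if horiz then i else p) (if horiz then p else j)
      · rfl
      · exfalso
        simp only [pvCondA, Bool.and_eq_true, decide_eq_true_eq] at h
        cases horiz
        · exact hp ⟨h.1.1.1.1, h.1.1.1.2⟩
        · exact hp ⟨h.1.1.2, h.1.2⟩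
    rw [h1]
    unfold pvCondL
    rcases (not_and_or.mp hp) with h | h
    · simp [h]
    · have hnl : ¬ (p < (L.length : Int)) := by rw [hL, pvLineLen]; exact h
      simp [hnl]

-- when the guard holds, A's extracted letter is the line's character
theorem pvLetBridge (plateau : List (List String)) (i j : Int) (horiz : Bool) (k : Nat)
    (hc : pvCondL (pvLineB plateau (plateau.length : Int) i j horiz) (k : Int) = true) :
    (pvCellLetterA (pvCellAt plateau (if horiz then i else (k : Int)) (if horiz then (k : Int) else j))).toList
      = [(pvLineB plateau (plateau.length : Int) i j horiz).getD k '.'] := by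
  have hcond : pvCondA plateau (plateau.length : Int) (if horiz then i else (k : Int)) (if horiz then (k : Int) else j) = true := by
    rw [pvCondBridge]; exact hc
  obtain ⟨hiff, hlet⟩ := pvBridgeCond plateau i j horiz (k : Int)
  have hne := hiff.mp hcond
  have hk : k < plateau.length := by
    simp only [pvCondL, Bool.and_eq_true, decide_eq_true_eq, pvLineLen] at hc
    omega
  have hchar := pvLineChar plateau (plateau.length : Int) i j horiz k hk
  rcases hcs : (pvLetterB plateau (plateau.length : Int) i j horiz (k : Int)).toList with _ | ⟨ch, t⟩
  · exact absurd hcs hne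
  · have ht : t = [] := by
      simp only [pvLetterB] at hcs
      rw [pvScanEq] at hcs
      repeat' split at hcs
      all_goals first
        | (rw [pvStrEmptyToList] at hcs; cases hcs)
        | (rw [← pvScanEq] at hcs; exact (pvScanShape _ _ _ hcs).2)
    rw [hlet hcond, hcs, hchar, hcs, ht]

-- ---------- 1-D models of A's two loops ----------

def pvBack1 (cond : Int → Bool) : Nat → Int → Int
  | 0, p => p
  | f + 1, p => if cond (p - 1) then pvBack1 cond f (p - 1) else p

def pvFwd1 (cond : Int → Bool) (lt : Int → String) : Nat → Int → List String → List String
  | 0, _, acc => acc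
  | f + 1, p, acc => if cond p then pvFwd1 cond lt f (p + 1) (acc ++ [lt p]) else acc

theorem pvBackAH (plateau : List (List String)) (n : Int) :
    ∀ (f : Nat) (l c : Int), pvBackA plateau n 0 1 f l c = (l, pvBack1 (fun p => pvCondA plateau n l p) f c) := by
  intro f
  induction f with
  | zero => intro l c; rfl
  | succ f ih => intro l c; simp only [pvBackA, pvBack1, sub_zero]; split <;> simp [ih]

theorem pvBackAV (plateau : List (List String)) (n : Int) :
    ∀ (f : Nat) (l c : Int), pvBackA plateau n 1 0 f l c = (pvBack1 (fun p => pvCondA plateau n p c) f l, c) := by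
  intro f
  induction f with
  | zero => intro l c; rfl
  | succ f ih => intro l c; simp only [pvBackA, pvBack1, sub_zero]; split <;> simp [ih]

theorem pvFwdAH (plateau : List (List String)) (n : Int) :
    ∀ (f : Nat) (l c : Int) (acc : List String),
      pvFwdA plateau n 0 1 f l c acc
        = pvFwd1 (fun p => pvCondA plateau n l p) (fun p => pvCellLetterA (pvCellAt plateau l p)) f c acc := by
  intro f
  induction f with
  | zero => intro l c acc; rfl
  | succ f ih => intro l c acc; simp only [pvFwdA, pvFwd1, add_zero]; split <;> simp [ih]

theorem pvFwdAV (plateau : List (List String)) (n : Int) :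
    ∀ (f : Nat) (l c : Int) (acc : List String),
      pvFwdA plateau n 1 0 f l c acc
        = pvFwd1 (fun p => pvCondA plateau n p c) (fun p => pvCellLetterA (pvCellAt plateau p c)) f l acc := by
  intro f
  induction f with
  | zero => intro l c acc; rfl
  | succ f ih => intro l c acc; simp only [pvFwdA, pvFwd1, add_zero]; split <;> simp [ih]

-- ---------- B's start scan versus A's backward walk ----------

theorem pvStartBSucc (L : List Char) (k : Nat) :
    pvStartB L ((k : Int) + 1) = if L.getD k '.' = '.' then (k : Int) + 1 else pvStartB L (k : Int) := by
  unfold pvStartB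
  have h1 : ((k : Int) + 1).toNat = k + 1 := by omega
  have h2 : ((k : Int)).toNat = k := by omega
  rw [h1, h2, List.range_succ, List.foldl_append]
  simp only [List.foldl_cons, List.foldl_nil]

theorem pvStartBRange (L : List Char) : ∀ k : Nat, 0 ≤ pvStartB L (k : Int) ∧ pvStartB L (k : Int) ≤ (k : Int) := by
  intro k
  induction k with
  | zero => exact ⟨le_refl 0, le_refl 0⟩
  | succ k ih =>
    have := pvStartBSucc L k
    push_cast
    rw [this]
    split
    · constructor <;> omega
    · push_cast at ih; constructor <;> omega

theorem pvBackStart (L : List Char) :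
    ∀ (k f : Nat), k ≤ f → (k : Int) ≤ (L.length : Int) →
      pvBack1 (pvCondL L) f (k : Int) = pvStartB L (k : Int) := by
  intro k
  induction k with
  | zero =>
    intro f _ _
    cases f with
    | zero => rfl
    | succ f =>
      show (if pvCondL L ((0 : Int) - 1) then _ else _) = _
      rw [if_neg (by simp [pvCondL])]
      rfl
  | succ k ih =>
    intro f hf hlen
    cases f with
    | zero => omega
    | succ f =>
      have hcast : ((k + 1 : Nat) : Int) - 1 = (k : Int) := by push_cast; ring
      show (if pvCondL L (((k + 1 : Nat) : Int) - 1) then pvBack1 (pvCondL L) f (((k + 1 : Nat) : Int) - 1) else ((k + 1 : Nat) : Int)) = _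
      rw [hcast]
      push_cast
      rw [pvStartBSucc L k]
      by_cases hc : pvCondL L (k : Int) = true
      · have hchar : ¬ (L.getD k '.' = '.') := by
          simp only [pvCondL, Bool.and_eq_true, bne_iff_ne, decide_eq_true_eq, Int.toNat_natCast] at hc
          exact hc.2
        rw [if_pos hc, if_neg hchar]
        have := ih f (by omega) (by push_cast at hlen ⊢; omega)
        push_cast at this
        exact this
      · have hchar : L.getD k '.' = '.' := by
          by_contra hne
          apply hc
          simp only [pvCondL, Bool.and_eq_true, bne_iff_ne, decide_eq_true_eq, Int.toNat_natCast]
          exact ⟨⟨by omega, by push_cast at hlen ⊢; omega⟩, hne⟩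
        rw [if_neg hc, if_pos hchar]

-- if the cell just before p0 shows no letter, the start scan lands on p0 itself
theorem pvStartBStay (L : List Char) (k : Nat) (hlen : k ≤ L.length)
    (hc : pvCondL L ((k : Int) - 1) = false) : pvStartB L (k : Int) = (k : Int) := by
  cases k with
  | zero => rfl
  | succ k =>
    have hcast : ((k + 1 : Nat) : Int) - 1 = (k : Int) := by push_cast; ring
    rw [hcast] at hc
    have hc' : ¬ (pvCondL L (k : Int) = true) := by simp [hc]
    have hchar : L.getD k '.' = '.' := by
      by_contra hne
      apply hc'
      simp only [pvCondL, Bool.and_eq_true, bne_iff_ne, decide_eq_true_eq, Int.toNat_natCast]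
      exact ⟨⟨by omega, by omega⟩, hne⟩
    push_cast
    rw [pvStartBSucc L k, if_pos hchar]

-- ---------- B's stop scan: the slice is the takeWhile block ----------

theorem pvStopBSpec (L : List Char) :
    ∀ (f s : Nat), L.length < s + f →
      ∃ t : Nat, pvStopB L (L.length : Int) f (s : Int) = (t : Int) ∧ s ≤ t ∧
        (L.drop s).take (t - s) = (L.drop s).takeWhile (fun c => c != '.') := by
  intro f
  induction f with
  | zero =>
    intro s h
    refine ⟨s, rfl, le_refl s, ?_⟩
    rw [Nat.sub_self, List.take_zero, List.drop_eq_nil_of_le (by omega)]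
    rfl
  | succ f ih =>
    intro s h
    have hstep : pvStopB L (L.length : Int) (f + 1) (s : Int)
        = if ((s : Int) < (L.length : Int) ∧ L.getD ((s : Int)).toNat '.' ≠ '.')
          then pvStopB L (L.length : Int) f ((s : Int) + 1) else (s : Int) := rfl
    by_cases hg : (s : Int) < (L.length : Int) ∧ L.getD ((s : Int)).toNat '.' ≠ '.'
    · obtain ⟨t, ht, hts, heq⟩ := ih (s + 1) (by omega)
      have hs1 : ((s : Int) + 1) = ((s + 1 : Nat) : Int) := by push_cast; ring
      have hslt : s < L.length := by exact_mod_cast hg.1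
      refine ⟨t, ?_, by omega, ?_⟩
      · rw [hstep, if_pos hg, hs1, ht]
      · have hne : L[s] ≠ '.' := by
          have h2 := hg.2
          rwa [Int.toNat_natCast, List.getD_eq_getElem L '.' hslt] at h2
        rw [List.drop_eq_getElem_cons hslt, show t - s = (t - (s + 1)) + 1 by omega]
        simp only [List.take_succ_cons, List.takeWhile_cons]
        simp only [bne_iff_ne, ne_eq, hne, not_false_eq_true, if_true]
        rw [heq]
    · refine ⟨s, by rw [hstep, if_neg hg], le_refl s, ?_⟩
      rw [Nat.sub_self, List.take_zero]
      by_cases hs : s < L.length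
      · have hdot : L[s] = '.' := by
          rcases not_and_or.mp hg with h' | h'
          · exact absurd (by exact_mod_cast hs) h'
          · have h4 := not_not.mp h'
            rwa [Int.toNat_natCast, List.getD_eq_getElem L '.' hs] at h4
        rw [List.drop_eq_getElem_cons hs]
        simp [hdot]
      · rw [List.drop_eq_nil_of_le (by omega)]
        rfl

-- ---------- A's forward collection is the takeWhile block of the line ----------

theorem pvFwd1Acc (cond : Int → Bool) (lt : Int → String) :
    ∀ (f : Nat) (p : Int) (acc : List String),
      pvFwd1 cond lt f p acc = acc ++ pvFwd1 cond lt f p [] := by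
  intro f
  induction f with
  | zero => intro p acc; simp [pvFwd1]
  | succ f ih =>
    intro p acc
    show (if cond p then pvFwd1 cond lt f (p + 1) (acc ++ [lt p]) else acc)
      = acc ++ (if cond p then pvFwd1 cond lt f (p + 1) ([] ++ [lt p]) else [])
    by_cases hc : cond p = true
    · rw [if_pos hc, if_pos hc, ih (p + 1) (acc ++ [lt p]), ih (p + 1) ([] ++ [lt p])]
      simp
    · rw [if_neg (by simp [hc]), if_neg (by simp [hc])]
      simp

theorem pvJoinNilFlat : ∀ ls : List (List Char), PySem.Chars.join [] ls = ls.flatten := by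
  intro ls
  induction ls with
  | nil => exact PySem.Chars.join_nil []
  | cons p rest ih => rw [pvJoinEmptyCons, ih]; rfl

theorem pvJoinFlat (l : List String) :
    (PySem.Str.join "" l).toList = (l.map String.toList).flatten := by
  rw [PySem.Str.toList_join, pvStrEmptyToList, pvJoinNilFlat]

theorem pvFwdTake (L : List Char) (lt : Int → String)
    (hlt : ∀ k : Nat, pvCondL L (k : Int) = true → (lt (k : Int)).toList = [L.getD k '.']) :
    ∀ (f s : Nat), L.length < s + f →
      (PySem.Str.join "" (pvFwd1 (pvCondL L) lt f (s : Int) [])).toList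
        = (L.drop s).takeWhile (fun c => c != '.') := by
  intro f
  induction f with
  | zero =>
    intro s h
    rw [show pvFwd1 (pvCondL L) lt 0 (s : Int) [] = [] from rfl, pvJoinFlat,
      List.drop_eq_nil_of_le (by omega)]
    rfl
  | succ f ih =>
    intro s h
    have hstep : pvFwd1 (pvCondL L) lt (f + 1) (s : Int) []
        = if pvCondL L (s : Int) then pvFwd1 (pvCondL L) lt f ((s : Int) + 1) ([] ++ [lt (s : Int)]) else [] := rfl
    by_cases hc : pvCondL L (s : Int) = true
    · have hslt : s < L.length := by
        simp only [pvCondL, Bool.and_eq_true, decide_eq_true_eq] at hc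
        omega
      have hs1 : ((s : Int) + 1) = ((s + 1 : Nat) : Int) := by push_cast; ring
      rw [hstep, if_pos hc, List.nil_append, pvFwd1Acc, hs1, pvJoinFlat]
      have hrec := ih (s + 1) (by omega)
      rw [pvJoinFlat] at hrec
      simp only [List.map_append, List.flatten_append, List.map_cons, List.map_nil,
        List.flatten_cons, List.flatten_nil, List.append_nil]
      rw [hrec, hlt s hc, List.drop_eq_getElem_cons hslt, List.takeWhile_cons,
        List.getD_eq_getElem L '.' hslt]
      have hne : L[s] ≠ '.' := by
        have h2 := hc
        simp only [pvCondL, Bool.and_eq_true, bne_iff_ne, decide_eq_true_eq, Int.toNat_natCast] at h2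
        rw [List.getD_eq_getElem L '.' hslt] at h2
        exact h2.2
      simp [hne]
    · rw [hstep, if_neg hc, pvJoinFlat]
      by_cases hs : s < L.length
      · have hdot : L[s] = '.' := by
          have h2 : ¬ ((0 ≤ (s : Int) ∧ (s : Int) < (L.length : Int)) ∧ L.getD s '.' ≠ '.') := by
            intro hh
            exact hc (by
              simp only [pvCondL, Bool.and_eq_true, bne_iff_ne, decide_eq_true_eq, Int.toNat_natCast]
              exact ⟨⟨hh.1.1, hh.1.2⟩, hh.2⟩)
          have h3 := not_and_or.mp h2
          rcases h3 with h' | h'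
          · exact absurd ⟨by omega, by exact_mod_cast hs⟩ h'
          · have h4 := not_not.mp h'
            rwa [List.getD_eq_getElem L '.' hs] at h4
        rw [List.drop_eq_getElem_cons hs]
        simp [hdot]
      · rw [List.drop_eq_nil_of_le (by omega)]
        rfl

-- ---------- putting the two sides together ----------

theorem pvCondABounds {plateau : List (List String)} {taille l c : Int}
    (h : pvCondA plateau taille l c = true) : 0 ≤ l ∧ l < taille ∧ 0 ≤ c ∧ c < taille := by
  simp only [pvCondA, Bool.and_eq_true, decide_eq_true_eq] at h
  exact ⟨h.1.1.1.1, h.1.1.1.2, h.1.1.2, h.1.2⟩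

theorem pvBackEq (L : List Char) (p0 : Int) (fb : Nat)
    (hp0 : 0 ≤ p0 ∧ p0 ≤ (L.length : Int))
    (hfb : pvCondL L (p0 - 1) = true → p0.toNat < fb) :
    pvBack1 (pvCondL L) fb p0 = pvStartB L p0 := by
  have hp0c : ((p0.toNat : Int)) = p0 := by omega
  cases hcb : pvCondL L (p0 - 1) with
  | false =>
    have hback : pvBack1 (pvCondL L) fb p0 = p0 := by
      cases fb with
      | zero => rfl
      | succ fb =>
        show (if pvCondL L (p0 - 1) then pvBack1 (pvCondL L) fb (p0 - 1) else p0) = p0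
        rw [hcb]
        simp
    rw [hback, ← hp0c, pvStartBStay L p0.toNat (by omega) (by rw [hp0c]; exact hcb), hp0c]
  | true =>
    have hb := pvBackStart L p0.toNat fb (by have := hfb hcb; omega) (by rw [hp0c]; exact_mod_cast hp0.2)
    rw [hp0c] at hb
    exact hb

theorem pvWordEq (L : List Char) (lt : Int → String) (s0 : Nat) (ff : Nat)
    (hlt : ∀ k : Nat, pvCondL L (k : Int) = true → (lt (k : Int)).toList = [L.getD k '.'])
    (hff : pvCondL L (s0 : Int) = true → (L.length : Int) < (s0 : Int) + (ff : Int)) :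
    (PySem.Str.join "" (pvFwd1 (pvCondL L) lt ff (s0 : Int) [])).toList
      = PySem.List.slice L (some (s0 : Int)) (some (pvStopB L (L.length : Int) (L.length + 1) (s0 : Int))) := by
  by_cases hcs : pvCondL L (s0 : Int) = true
  · have hlen2 : L.length < s0 + ff := by have := hff hcs; omega
    rw [pvFwdTake L lt hlt ff s0 hlen2]
    obtain ⟨t, ht, hts, heq⟩ := pvStopBSpec L (L.length + 1) s0 (by omega)
    rw [ht, PySem.List.slice_natCast, heq]
  · have hfwd : pvFwd1 (pvCondL L) lt ff (s0 : Int) [] = [] := by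
      cases ff with
      | zero => rfl
      | succ ff =>
        show (if pvCondL L (s0 : Int) then pvFwd1 (pvCondL L) lt ff ((s0 : Int) + 1) ([] ++ [lt (s0 : Int)]) else []) = []
        rw [if_neg (by simp [hcs])]
    have hguard : ¬ ((s0 : Int) < (L.length : Int) ∧ L.getD ((s0 : Int)).toNat '.' ≠ '.') := by
      intro hh
      exact hcs (by
        simp only [pvCondL, Bool.and_eq_true, bne_iff_ne, decide_eq_true_eq]
        exact ⟨⟨by omega, hh.1⟩, hh.2⟩)
    have hstop : pvStopB L (L.length : Int) (L.length + 1) (s0 : Int) = (s0 : Int) := by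
      show (if ((s0 : Int) < (L.length : Int) ∧ L.getD ((s0 : Int)).toNat '.' ≠ '.')
        then pvStopB L (L.length : Int) L.length ((s0 : Int) + 1) else (s0 : Int)) = (s0 : Int)
      rw [if_neg hguard]
    rw [hstop, hfwd, PySem.List.slice_natCast, Nat.sub_self, List.take_zero, pvJoinFlat]
    rfl

theorem pvJoinNilStr : PySem.Str.join "" [] = "" :=
  String.toList_inj.mp (by rw [pvJoinFlat]; rfl)

-- ===== VERDICT (by name: the statement is the Claim_ definition above) =====
theorem extend_word_py_spec : Claim_equal_extend_word_py := by
  intro plateau i j direction _ _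
  unfold Spec_extend_word_py extend_word_py extend_word_py_alt
  by_cases hH : PySem.Str.upper direction = "H"
  · simp only [hH, reduceIte, decide_true]
    set L := pvLineB plateau (plateau.length : Int) i j true with hLdef
    have hLlen : L.length = plateau.length := pvLineLen plateau _ i j true
    have hce : (fun p => pvCondA plateau (plateau.length : Int) i p) = pvCondL L := by
      funext p
      have h := pvCondBridge plateau i j true p
      simpa using h
    rw [pvBackAH plateau (plateau.length : Int) ((i + j).toNat + 1) i j]
    dsimp only
    rw [pvFwdAH, hce]
    have hlt : ∀ k : Nat, pvCondL L (k : Int) = true →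
        ((fun p => pvCellLetterA (pvCellAt plateau i p)) (k : Int)).toList = [L.getD k '.'] := by
      intro k hk
      have h := pvLetBridge plateau i j true k hk
      simpa using h
    by_cases hio : 0 ≤ j ∧ j ≤ ((plateau.length : Nat) : Int)
    · rw [if_pos hio]
      have hback : pvBack1 (pvCondL L) ((i + j).toNat + 1) j = pvStartB L j := by
        apply pvBackEq
        · exact ⟨hio.1, by rw [hLlen]; exact hio.2⟩
        · intro hcb
          have hA : pvCondA plateau (plateau.length : Int) i (j - 1) = true := by
            rw [congrFun hce (j - 1)]; exact hcb
          obtain ⟨hi0, hi1, hj0, hj1⟩ := pvCondABounds hA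
          omega
      rw [hback]
      obtain ⟨s0, hs0⟩ : ∃ s0 : Nat, pvStartB L j = (s0 : Int) := by
        have h1 := (pvStartBRange L j.toNat).1
        have hc : ((j.toNat : Int)) = j := by omega
        rw [hc] at h1
        exact ⟨(pvStartB L j).toNat, by omega⟩
      rw [hs0]
      have hff : pvCondL L (s0 : Int) = true →
          (L.length : Int) < (s0 : Int) + (((2 * (plateau.length : Int) - i - (s0 : Int)).toNat + 1 : Nat) : Int) := by
        intro hcs
        have hA : pvCondA plateau (plateau.length : Int) i (s0 : Int) = true := by
          rw [congrFun hce ((s0 : Int))]; exact hcs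
        obtain ⟨hi0, hi1, hs00, hs01⟩ := pvCondABounds hA
        have hT : ((2 * (plateau.length : Int) - i - (s0 : Int)).toNat : Int)
            = 2 * (plateau.length : Int) - i - (s0 : Int) := by omega
        have hL2 : L.length = plateau.length := hLlen
        push_cast
        push_cast at hT
        omega
      have hword := pvWordEq L (fun p => pvCellLetterA (pvCellAt plateau i p)) s0
        ((2 * (plateau.length : Int) - i - (s0 : Int)).toNat + 1) hlt hff
      rw [show ((L.length : Nat) : Int) = ((plateau.length : Nat) : Int) from by rw [hLlen]] at hword
      refine Prod.ext ?_ rfl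
      refine String.toList_inj.mp ?_
      rw [String.toList_ofList]
      exact hword
    · rw [if_neg hio]
      have hL2 : L.length = plateau.length := hLlen
      have hcb : pvCondL L (j - 1) = false := by
        cases hq : pvCondL L (j - 1)
        · rfl
        · exfalso
          simp only [pvCondL, Bool.and_eq_true, decide_eq_true_eq] at hq
          exact hio ⟨by omega, by omega⟩
      have hcj : pvCondL L j = false := by
        cases hq : pvCondL L j
        · rfl
        · exfalso
          simp only [pvCondL, Bool.and_eq_true, decide_eq_true_eq] at hq
          exact hio ⟨by omega, by omega⟩
      have hb1 : pvBack1 (pvCondL L) ((i + j).toNat + 1) j = j := by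
        show (if pvCondL L (j - 1) then pvBack1 (pvCondL L) ((i + j).toNat) (j - 1) else j) = j
        rw [hcb]
        simp
      rw [hb1]
      have hfwd : pvFwd1 (pvCondL L) (fun p => pvCellLetterA (pvCellAt plateau i p))
          ((2 * (plateau.length : Int) - i - j).toNat + 1) j [] = [] := by
        show (if pvCondL L j then pvFwd1 (pvCondL L) (fun p => pvCellLetterA (pvCellAt plateau i p))
          ((2 * (plateau.length : Int) - i - j).toNat) (j + 1) ([] ++ [(fun p => pvCellLetterA (pvCellAt plateau i p)) j]) else []) = []
        rw [hcj]
        simp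
      rw [hfwd, pvJoinNilStr]
  · simp only [hH, reduceIte, decide_false]
    set L := pvLineB plateau (plateau.length : Int) i j false with hLdef
    have hLlen : L.length = plateau.length := pvLineLen plateau _ i j false
    have hce : (fun p => pvCondA plateau (plateau.length : Int) p j) = pvCondL L := by
      funext p
      have h := pvCondBridge plateau i j false p
      simpa using h
    rw [pvBackAV plateau (plateau.length : Int) ((i + j).toNat + 1) i j]
    dsimp only
    rw [pvFwdAV, hce]
    have hlt : ∀ k : Nat, pvCondL L (k : Int) = true →
        ((fun p => pvCellLetterA (pvCellAt plateau p j)) (k : Int)).toList = [L.getD k '.'] := by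
      intro k hk
      have h := pvLetBridge plateau i j false k hk
      simpa using h
    by_cases hio : 0 ≤ i ∧ i ≤ ((plateau.length : Nat) : Int)
    · rw [if_pos hio]
      have hback : pvBack1 (pvCondL L) ((i + j).toNat + 1) i = pvStartB L i := by
        apply pvBackEq
        · exact ⟨hio.1, by rw [hLlen]; exact hio.2⟩
        · intro hcb
          have hA : pvCondA plateau (plateau.length : Int) (i - 1) j = true := by
            rw [congrFun hce (i - 1)]; exact hcb
          obtain ⟨hi0, hi1, hj0, hj1⟩ := pvCondABounds hA
          omega
      rw [hback]
      obtain ⟨s0, hs0⟩ : ∃ s0 : Nat, pvStartB L i = (s0 : Int) := by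
        have h1 := (pvStartBRange L i.toNat).1
        have hc : ((i.toNat : Int)) = i := by omega
        rw [hc] at h1
        exact ⟨(pvStartB L i).toNat, by omega⟩
      rw [hs0]
      have hff : pvCondL L (s0 : Int) = true →
          (L.length : Int) < (s0 : Int) + (((2 * (plateau.length : Int) - (s0 : Int) - j).toNat + 1 : Nat) : Int) := by
        intro hcs
        have hA : pvCondA plateau (plateau.length : Int) (s0 : Int) j = true := by
          rw [congrFun hce ((s0 : Int))]; exact hcs
        obtain ⟨hs00, hs01, hj0, hj1⟩ := pvCondABounds hA
        have hT : ((2 * (plateau.length : Int) - (s0 : Int) - j).toNat : Int)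
            = 2 * (plateau.length : Int) - (s0 : Int) - j := by omega
        have hL2 : L.length = plateau.length := hLlen
        push_cast
        push_cast at hT
        omega
      have hword := pvWordEq L (fun p => pvCellLetterA (pvCellAt plateau p j)) s0
        ((2 * (plateau.length : Int) - (s0 : Int) - j).toNat + 1) hlt hff
      rw [show ((L.length : Nat) : Int) = ((plateau.length : Nat) : Int) from by rw [hLlen]] at hword
      refine Prod.ext ?_ rfl
      refine String.toList_inj.mp ?_
      rw [String.toList_ofList]
      exact hword
    · rw [if_neg hio]
      have hL2 : L.length = plateau.length := hLlen
      have hcb : pvCondL L (i - 1) = false := by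
        cases hq : pvCondL L (i - 1)
        · rfl
        · exfalso
          simp only [pvCondL, Bool.and_eq_true, decide_eq_true_eq] at hq
          exact hio ⟨by omega, by omega⟩
      have hci : pvCondL L i = false := by
        cases hq : pvCondL L i
        · rfl
        · exfalso
          simp only [pvCondL, Bool.and_eq_true, decide_eq_true_eq] at hq
          exact hio ⟨by omega, by omega⟩
      have hb1 : pvBack1 (pvCondL L) ((i + j).toNat + 1) i = i := by
        show (if pvCondL L (i - 1) then pvBack1 (pvCondL L) ((i + j).toNat) (i - 1) else i) = i
        rw [hcb]
        simp
      rw [hb1]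
      have hfwd : pvFwd1 (pvCondL L) (fun p => pvCellLetterA (pvCellAt plateau p j))
          ((2 * (plateau.length : Int) - i - j).toNat + 1) i [] = [] := by
        show (if pvCondL L i then pvFwd1 (pvCondL L) (fun p => pvCellLetterA (pvCellAt plateau p j))
          ((2 * (plateau.length : Int) - i - j).toNat) (i + 1) ([] ++ [(fun p => pvCellLetterA (pvCellAt plateau p j)) i]) else []) = []
        rw [hci]
        simp
      rw [hfwd, pvJoinNilStr]
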